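-- pv_equiv track=rewrite | github.com/giuliaschneider/aoc-2024 | days/day19.py | part2
-- ===== SOURCE A (Python) =====
-- from collections import defaultdict
--
-- def find_combinations(design, available_towels):
--     n = len(design)
--     dp = defaultdict(int)
--     dp[0] = 1
--
--     for i in range(n):
--         if i not in dp:
--             continue
--
--         for towel in available_towels:
--             if i + len(towel) > n:
--                 continue
--
--             if design[i : i + len(towel)] == towel:
--                 new_pos = i + len(towel)
--                 dp[new_pos] += dp[i]
--
--     return dp[n]
--
-- def part2(available_towels, designs) -> int:
--     """Solve part 1."""
--     sorted_towels = sorted(available_towels, key=len, reverse=True)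
--     count = 0
--     for design in designs:
--         result = find_combinations(design, sorted_towels)
--         if result:
--             count += result
--     return count
-- ===== SOURCE B (Python) =====
-- from collections import Counter
--
-- def count_ways(counts, lengths, design):
--     n = len(design)
--     ways = [0] * (n + 1)
--     ways[0] = 1
--     for i in range(n):
--         for L in lengths:
--             if i + L <= n:
--                 ways[i + L] += counts[design[i:i + L]] * ways[i]
--     return ways[n]
--
-- def part2(available_towels, designs) -> int:
--     """Count total ways to build designs from towel pieces.
--
--     A Counter of the (nonempty) towels and the sorted set of distinct towel
--     lengths are built once; per design a forward array DP does one O(1)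
--     multiplicity lookup per (position, length) instead of scanning the whole
--     towel list at every position.
--     """
--     counts = Counter(t for t in available_towels if t)
--     lengths = sorted({len(t) for t in counts})
--     total = 0
--     for design in designs:
--         total += count_ways(counts, lengths, design)
--     return total
-- ===== Notes on version B (the rewrite author's own statement) =====
-- stated objective: faster
-- what changed: Instead of sorting the towels and scanning the whole towel list at every design position, B builds a Counter of the nonempty towels and the sorted set of distinct towel lengths once, and runs a forward array DP that does one multiplicity lookup per (position, distinct length).
import Mathlib
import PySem

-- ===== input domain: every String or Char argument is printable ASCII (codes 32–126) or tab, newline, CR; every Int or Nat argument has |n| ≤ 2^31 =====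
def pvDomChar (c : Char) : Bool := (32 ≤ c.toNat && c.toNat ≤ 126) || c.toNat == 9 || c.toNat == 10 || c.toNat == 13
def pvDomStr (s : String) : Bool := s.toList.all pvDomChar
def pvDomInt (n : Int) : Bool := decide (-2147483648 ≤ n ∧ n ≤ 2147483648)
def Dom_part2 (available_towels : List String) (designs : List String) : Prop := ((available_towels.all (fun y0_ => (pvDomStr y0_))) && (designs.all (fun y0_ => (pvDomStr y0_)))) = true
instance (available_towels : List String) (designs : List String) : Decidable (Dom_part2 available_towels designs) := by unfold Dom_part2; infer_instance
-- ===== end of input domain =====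

-- B replaces A's per-position scan of the whole (descending-sorted) towel list by one Counter
-- of the nonempty towels plus the sorted set of distinct towel lengths, built once, doing a
-- single multiplicity lookup per (position, length) in a forward array DP.

-- ===== PORT A =====
def findCombinations (design : String) (availableTowels : List String) : Int :=
  let n : Int := PySem.Str.len design
  let dp0 : PySem.Dict Int Int := PySem.Dict.insert PySem.Dict.empty 0 1   -- dp = defaultdict(int); dp[0] = 1
  let dp := (PySem.List.pyRange 0 n 1).foldl (fun dp i =>
    if dp.contains i = false then dp            -- "if i not in dp: continue"
    else availableTowels.foldl (fun dp towel =>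
      if i + PySem.Str.len towel > n then dp
      else if PySem.Str.slice design (some i) (some (i + PySem.Str.len towel)) = towel then
        -- new_pos = i + len(towel); dp[new_pos] += dp[i]
        PySem.Dict.modify dp (i + PySem.Str.len towel) 0 (fun v => v + dp.getD i 0)
      else dp) dp) dp0
  dp.getD n 0

def part2 (available_towels : List String) (designs : List String) : Int :=
  let sortedTowels := PySem.List.sorted available_towels (fun t => PySem.Str.len t) true
  designs.foldl (fun count design =>
    let result := findCombinations design sortedTowels
    if result ≠ 0 then count + result else count) 0

-- ===== PORT B =====
def countWays (counts : PySem.Dict String Int) (lengths : List Nat) (design : String) : Int :=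
  let n := design.toList.length
  let ways0 : List Int := (List.replicate (n + 1) (0 : Int)).set 0 1   -- ways = [0]*(n+1); ways[0] = 1
  let ways := (List.range n).foldl (fun ways i =>
    lengths.foldl (fun ways L =>
      if i + L ≤ n then
        ways.set (i + L)
          (ways.getD (i + L) 0
            + counts.getD (PySem.Str.slice design (some (i : Int)) (some ((i : Int) + (L : Int)))) 0
              * ways.getD i 0)
      else ways) ways) ways0
  ways.getD n 0

def part2_alt (available_towels : List String) (designs : List String) : Int :=
  let counts := PySem.Dict.counter (available_towels.filter (fun t => t.toList.length != 0))
  let lengths := PySem.List.sorted (PySem.Set.ofList (counts.keys.map (fun t => t.toList.length))) (fun x => x) false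
  designs.foldl (fun total design => total + countWays counts lengths design) 0

-- ===== PRECONDITION & SPEC =====
def Spec_part2 (available_towels : List String) (designs : List String) (out : Int) : Prop := out = part2_alt available_towels designs
instance (available_towels : List String) (designs : List String) (out : Int) : Decidable (Spec_part2 available_towels designs out) := by unfold Spec_part2; infer_instance

-- ===== CLAIM (what is proved, stated in full; the proofs are below) =====
def Claim_equal_part2 : Prop := ∀ (available_towels : List String) (designs : List String), Dom_part2 available_towels designs → Spec_part2 available_towels designs (part2 available_towels designs)

-- ===== LEMMAS AND PROOFS =====

-- multiplicity of the slice design[i:j] among the towels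
def pvCnt (ts : List String) (design : String) (i j : Nat) : Int :=
  (ts.count (PySem.Str.slice design (some (i : Int)) (some (j : Int))) : Int)

-- the common ideal forward DP table both programs compute
def pvV (ts : List String) (design : String) : Nat → Nat → Int
  | 0, j => if j = 0 then 1 else 0
  | k+1, j => pvV ts design k j +
      (if k < j ∧ j ≤ design.toList.length then pvCnt ts design k j * pvV ts design k k else 0)

def pvMatch (ts : List String) (design : String) (i j : Int) : Int :=
  ((ts.countP (fun t =>
      !(decide (i + PySem.Str.len t > PySem.Str.len design))
      && decide (PySem.Str.slice design (some i) (some (i + PySem.Str.len t)) = t)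
      && decide (i + PySem.Str.len t = j)) : Nat) : Int)

theorem pv_getD_set_self (l : List Int) (i : Nat) (v d : Int) (h : i < l.length) :
    (l.set i v).getD i d = v := by simp [List.getD, h]

theorem pv_getD_set_ne (l : List Int) (i j : Nat) (v d : Int) (h : i ≠ j) :
    (l.set i v).getD j d = l.getD j d := by simp [List.getD, List.getElem?_set_ne h]

theorem pv_b_inner (cnts : PySem.Dict String Int) (design : String) (i : Nat)
    (Ls : List Nat) (hnd : Ls.Nodup) (hpos : ∀ L ∈ Ls, 1 ≤ L) :
    ∀ (ways : List Int), ways.length = design.toList.length + 1 →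
    ((Ls.foldl (fun ways L =>
        if i + L ≤ design.toList.length then
          ways.set (i + L)
            (ways.getD (i + L) 0
              + cnts.getD (PySem.Str.slice design (some (i : Int)) (some ((i : Int) + (L : Int)))) 0
                * ways.getD i 0)
        else ways) ways).length = design.toList.length + 1
     ∧ ∀ j, j ≤ design.toList.length →
        (Ls.foldl (fun ways L =>
          if i + L ≤ design.toList.length then
            ways.set (i + L)
              (ways.getD (i + L) 0
                + cnts.getD (PySem.Str.slice design (some (i : Int)) (some ((i : Int) + (L : Int)))) 0
                  * ways.getD i 0)
          else ways) ways).getD j 0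
        = ways.getD j 0 + (if i < j ∧ (j - i) ∈ Ls then
            cnts.getD (PySem.Str.slice design (some (i : Int)) (some (j : Int))) 0 * ways.getD i 0 else 0)) := by
  induction Ls with
  | nil => intro ways hw; simp [hw]
  | cons L Ls ih =>
      intro ways hw
      simp only [List.foldl_cons]
      by_cases hle : i + L ≤ design.toList.length
      · have hL1 : 1 ≤ L := hpos L (List.mem_cons_self ..)
        have hne : i + L ≠ i := by omega
        set ways' := ways.set (i + L)
          (ways.getD (i + L) 0
            + cnts.getD (PySem.Str.slice design (some (i : Int)) (some ((i : Int) + (L : Int)))) 0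
              * ways.getD i 0) with hways'
        have hw' : ways'.length = design.toList.length + 1 := by simp [hways', hw]
        obtain ⟨hlen, hval⟩ := ih hnd.of_cons (fun L' h => hpos L' (List.mem_cons_of_mem _ h)) ways' hw'
        rw [if_pos hle]
        refine ⟨hlen, fun j hj => ?_⟩
        rw [hval j hj]
        have hwi : ways'.getD i 0 = ways.getD i 0 := pv_getD_set_ne _ _ _ _ _ hne
        rw [hwi]
        by_cases hji : j = i + L
        · subst hji
          have hnotin : (i + L - i) ∉ Ls := by
            rw [show i + L - i = L by omega]; exact (List.nodup_cons.mp hnd).1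
          rw [if_neg (by tauto), if_pos ⟨by omega, by
            rw [show i + L - i = L by omega]; exact List.mem_cons_self ..⟩]
          have : ways'.getD (i+L) 0 = ways.getD (i + L) 0
              + cnts.getD (PySem.Str.slice design (some (i : Int)) (some ((i : Int) + (L : Int)))) 0
                * ways.getD i 0 := pv_getD_set_self _ _ _ _ (by omega)
          rw [this]
          have hcast : (i : Int) + (L : Int) = ((i + L : Nat) : Int) := by push_cast; ring
          rw [hcast]; ring
        · have : ways'.getD j 0 = ways.getD j 0 := pv_getD_set_ne _ _ _ _ _ (fun h => hji h.symm)
          rw [this]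
          congr 1
          have hmem : (i < j ∧ (j - i) ∈ L :: Ls) ↔ (i < j ∧ (j - i) ∈ Ls) := by
            constructor
            · rintro ⟨h1, h2⟩
              rcases List.mem_cons.mp h2 with h | h
              · exact absurd (by omega : j = i + L) hji
              · exact ⟨h1, h⟩
            · rintro ⟨h1, h2⟩; exact ⟨h1, List.mem_cons_of_mem _ h2⟩
          simp only [hmem]
      · rw [if_neg hle]
        obtain ⟨hlen, hval⟩ := ih hnd.of_cons (fun L' h => hpos L' (List.mem_cons_of_mem _ h)) ways hw
        refine ⟨hlen, fun j hj => ?_⟩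
        rw [hval j hj]
        congr 1
        have hmem : (i < j ∧ (j - i) ∈ L :: Ls) ↔ (i < j ∧ (j - i) ∈ Ls) := by
          constructor
          · rintro ⟨h1, h2⟩
            rcases List.mem_cons.mp h2 with h | h
            · exfalso; omega
            · exact ⟨h1, h⟩
          · rintro ⟨h1, h2⟩; exact ⟨h1, List.mem_cons_of_mem _ h2⟩
        simp only [hmem]

theorem pv_b_facts_pos (towels : List String) :
    ∀ L ∈ PySem.List.sorted (PySem.Set.ofList
        ((PySem.Dict.counter (towels.filter (fun t => t.toList.length != 0))).keys.map
          (fun t => t.toList.length))) (fun x => x) false, 1 ≤ L := by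
  intro L hL
  rw [PySem.List.mem_sorted] at hL
  rw [PySem.Set.mem_ofList] at hL
  obtain ⟨t, ht, rfl⟩ := List.mem_map.mp hL
  rw [PySem.Dict.keys_counter, PySem.Set.mem_ofList] at ht
  have h2 := (List.mem_filter.mp ht).2
  rw [Nat.one_le_iff_ne_zero]
  intro h0
  rw [h0] at h2
  simp at h2

theorem pv_slice_toList (design : String) (i j : Nat) :
    (PySem.Str.slice design (some (i : Int)) (some (j : Int))).toList
      = (design.toList.drop i).take (j - i) := by
  simp [PySem.Str.toList_slice, PySem.List.slice_natCast]

theorem pv_slice_len (design : String) (i j : Nat) (hij : i < j) (hj : j ≤ design.toList.length) :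
    (PySem.Str.slice design (some (i : Int)) (some (j : Int))).toList.length = j - i := by
  rw [pv_slice_toList, List.length_take, List.length_drop]
  omega

theorem pv_b_facts_cnt (towels : List String) (design : String) (i j : Nat)
    (hij : i < j) (hj : j ≤ design.toList.length) :
    (if (j - i) ∈ PySem.List.sorted (PySem.Set.ofList
        ((PySem.Dict.counter (towels.filter (fun t => t.toList.length != 0))).keys.map
          (fun t => t.toList.length))) (fun x => x) false
     then (PySem.Dict.counter (towels.filter (fun t => t.toList.length != 0))).getD
            (PySem.Str.slice design (some (i : Int)) (some (j : Int))) 0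
     else 0) = pvCnt towels design i j := by
  set s := PySem.Str.slice design (some (i : Int)) (some (j : Int)) with hs
  have hslen : s.toList.length = j - i := pv_slice_len design i j hij hj
  split_ifs with hmem
  · rw [PySem.Dict.getD_counter]
    unfold pvCnt
    rw [List.count_filter (by simp [hslen]; omega)]
  · unfold pvCnt
    rw [List.count_eq_zero.mpr, Nat.cast_zero]
    intro hmem'
    apply hmem
    rw [PySem.List.mem_sorted, PySem.Set.mem_ofList]
    refine List.mem_map.mpr ⟨s, ?_, hslen⟩
    rw [PySem.Dict.keys_counter, PySem.Set.mem_ofList]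
    exact List.mem_filter.mpr ⟨hmem', by simp [hslen]; omega⟩

theorem pv_b_outer (towels : List String) (design : String) :
    ∀ k, k ≤ design.toList.length →
    (((List.range k).foldl (fun ways i =>
        (PySem.List.sorted (PySem.Set.ofList
          ((PySem.Dict.counter (towels.filter (fun t => t.toList.length != 0))).keys.map
            (fun t => t.toList.length))) (fun x => x) false).foldl (fun ways L =>
          if i + L ≤ design.toList.length then
            ways.set (i + L)
              (ways.getD (i + L) 0
                + (PySem.Dict.counter (towels.filter (fun t => t.toList.length != 0))).getD
                    (PySem.Str.slice design (some (i : Int)) (some ((i : Int) + (L : Int)))) 0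
                  * ways.getD i 0)
          else ways) ways)
        ((List.replicate (design.toList.length + 1) (0 : Int)).set 0 1)).length
      = design.toList.length + 1
     ∧ ∀ j, j ≤ design.toList.length →
      ((List.range k).foldl (fun ways i =>
        (PySem.List.sorted (PySem.Set.ofList
          ((PySem.Dict.counter (towels.filter (fun t => t.toList.length != 0))).keys.map
            (fun t => t.toList.length))) (fun x => x) false).foldl (fun ways L =>
          if i + L ≤ design.toList.length then
            ways.set (i + L)
              (ways.getD (i + L) 0
                + (PySem.Dict.counter (towels.filter (fun t => t.toList.length != 0))).getD
                    (PySem.Str.slice design (some (i : Int)) (some ((i : Int) + (L : Int)))) 0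
                  * ways.getD i 0)
          else ways) ways)
        ((List.replicate (design.toList.length + 1) (0 : Int)).set 0 1)).getD j 0
      = pvV towels design k j) := by
  intro k
  induction k with
  | zero =>
      intro _
      constructor
      · simp
      · intro j hj
        show ((List.replicate (design.toList.length + 1) (0 : Int)).set 0 1).getD j 0 = pvV towels design 0 j
        by_cases hj0 : j = 0
        · subst hj0
          rw [pv_getD_set_self _ _ _ _ (by simp)]
          simp [pvV]
        · rw [pv_getD_set_ne _ _ _ _ _ (fun h => hj0 h.symm)]
          simp [pvV, hj0]
  | succ k ih =>
      intro hk1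
      have hk : k ≤ design.toList.length := by omega
      obtain ⟨hlen, hval⟩ := ih hk
      rw [List.range_succ, List.foldl_append, List.foldl_cons, List.foldl_nil]
      have hnd : (PySem.List.sorted (PySem.Set.ofList
          ((PySem.Dict.counter (towels.filter (fun t => t.toList.length != 0))).keys.map
            (fun t => t.toList.length))) (fun x => x) false).Nodup :=
        ((PySem.List.sorted_perm _ _ _).nodup_iff).mpr (PySem.Set.nodup_ofList _)
      obtain ⟨hlen', hval'⟩ := pv_b_inner
        (PySem.Dict.counter (towels.filter (fun t => t.toList.length != 0))) design k
        _ hnd (pv_b_facts_pos towels) _ hlen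
      refine ⟨hlen', fun j hj => ?_⟩
      rw [hval' j hj, hval j hj]
      show _ = pvV towels design (k+1) j
      rw [pvV]
      congr 1
      by_cases hkj : k < j
      · have hc := pv_b_facts_cnt towels design k j hkj hj
        rw [if_pos (And.intro hkj hj), ← hval k hk]
        by_cases hmem : (j - k) ∈ PySem.List.sorted (PySem.Set.ofList
            ((PySem.Dict.counter (towels.filter (fun t => t.toList.length != 0))).keys.map
              (fun t => t.toList.length))) (fun x => x) false
        · rw [if_pos (And.intro hkj hmem)]
          rw [if_pos hmem] at hc
          rw [hc]
        · rw [if_neg (by tauto)]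
          rw [if_neg hmem] at hc
          rw [← hc]
          ring
      · rw [if_neg (by tauto), if_neg (by tauto)]

theorem pv_str_len_nonneg (s : String) : 0 ≤ PySem.Str.len s := by
  simp [PySem.Str.len_eq]

-- a run of empty towels only ever touches key i

theorem pv_a_zero (design : String) (i : Int) :
    ∀ (ts : List String), (∀ t ∈ ts, PySem.Str.len t = 0) →
    ∀ (dp : PySem.Dict Int Int), ∀ j : Int, j ≠ i →
    (ts.foldl (fun dp towel =>
      if i + PySem.Str.len towel > PySem.Str.len design then dp
      else if PySem.Str.slice design (some i) (some (i + PySem.Str.len towel)) = towel then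
        PySem.Dict.modify dp (i + PySem.Str.len towel) 0 (fun v => v + dp.getD i 0)
      else dp) dp).getD j 0 = dp.getD j 0 := by
  intro ts
  induction ts with
  | nil => intro _ dp j hji; rfl
  | cons t ts ih =>
      intro hz dp j hji
      have ht0 : PySem.Str.len t = 0 := hz t (List.mem_cons_self ..)
      simp only [List.foldl_cons]
      split_ifs with h1 h2
      · exact ih (fun t' h => hz t' (List.mem_cons_of_mem _ h)) dp j hji
      · rw [ih (fun t' h => hz t' (List.mem_cons_of_mem _ h)) _ j hji]
        rw [ht0, add_zero]
        exact PySem.Dict.getD_modify_of_ne dp 0 _ hji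
      · exact ih (fun t' h => hz t' (List.mem_cons_of_mem _ h)) dp j hji

theorem pv_a_inner (design : String) (i : Int) :
    ∀ (ts : List String), ts.Pairwise (fun a b => PySem.Str.len b ≤ PySem.Str.len a) →
    ∀ (dp : PySem.Dict Int Int), ∀ j : Int, j ≠ i →
    (ts.foldl (fun dp towel =>
      if i + PySem.Str.len towel > PySem.Str.len design then dp
      else if PySem.Str.slice design (some i) (some (i + PySem.Str.len towel)) = towel then
        PySem.Dict.modify dp (i + PySem.Str.len towel) 0 (fun v => v + dp.getD i 0)
      else dp) dp).getD j 0
    = dp.getD j 0 + pvMatch ts design i j * dp.getD i 0 := by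
  intro ts
  induction ts with
  | nil => intro _ dp j hji; simp [pvMatch]
  | cons t ts ih =>
      intro hp dp j hji
      have hp' := (List.pairwise_cons.mp hp).2
      have hhead := (List.pairwise_cons.mp hp).1
      have hsplit : pvMatch (t :: ts) design i j
          = pvMatch ts design i j + (if (!(decide (i + PySem.Str.len t > PySem.Str.len design))
              && decide (PySem.Str.slice design (some i) (some (i + PySem.Str.len t)) = t)
              && decide (i + PySem.Str.len t = j)) = true then 1 else 0) := by
        unfold pvMatch
        rw [List.countP_cons]
        split_ifs with h <;> push_cast <;> ring
      simp only [List.foldl_cons]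
      by_cases h1 : i + PySem.Str.len t > PySem.Str.len design
      · rw [if_pos h1, ih hp' dp j hji, hsplit]
        have hb : (!(decide (i + PySem.Str.len t > PySem.Str.len design))
              && decide (PySem.Str.slice design (some i) (some (i + PySem.Str.len t)) = t)
              && decide (i + PySem.Str.len t = j)) = false := by
          rw [decide_eq_true h1]
          simp
        rw [hb]
        simp only [if_neg Bool.false_ne_true]
        ring
      · rw [if_neg h1]
        by_cases h2 : PySem.Str.slice design (some i) (some (i + PySem.Str.len t)) = t
        · rw [if_pos h2]
          by_cases hz : PySem.Str.len t = 0
          · have hall : ∀ t' ∈ ts, PySem.Str.len t' = 0 := by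
              intro t' h
              have h3 := hhead t' h
              have h4 := pv_str_len_nonneg t'
              omega
            rw [pv_a_zero design i ts hall _ j hji]
            have hkey : i + PySem.Str.len t = i := by rw [hz]; ring
            rw [hkey, PySem.Dict.getD_modify_of_ne dp 0 _ hji, hsplit]
            have hm0 : pvMatch ts design i j = 0 := by
              unfold pvMatch
              rw [List.countP_eq_zero.mpr, Nat.cast_zero]
              intro t' h
              simp only [Bool.and_eq_true, decide_eq_true_eq, Bool.not_eq_true']
              rintro ⟨⟨-, -⟩, h3⟩
              rw [hall t' h, add_zero] at h3
              exact hji h3.symm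
            rw [hm0]
            have hb : (!(decide (i + PySem.Str.len t > PySem.Str.len design))
                && decide (PySem.Str.slice design (some i) (some (i + PySem.Str.len t)) = t)
                && decide (i + PySem.Str.len t = j)) = false := by
              have hne3 : ¬ (i + PySem.Str.len t = j) := by rw [hkey]; exact fun h => hji h.symm
              rw [decide_eq_false hne3]
              simp
            rw [hb]
            simp only [if_neg Bool.false_ne_true]
            ring
          · have hpos : 0 < PySem.Str.len t :=
              lt_of_le_of_ne (pv_str_len_nonneg t) (Ne.symm hz)
            have hne : i + PySem.Str.len t ≠ i := by omega
            rw [ih hp' _ j hji, hsplit]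
            have hdpi : (PySem.Dict.modify dp (i + PySem.Str.len t) 0 (fun v => v + dp.getD i 0)).getD i 0
                = dp.getD i 0 := PySem.Dict.getD_modify_of_ne dp 0 _ (fun h => hne h.symm)
            rw [hdpi]
            by_cases hjp : j = i + PySem.Str.len t
            · have hv : (PySem.Dict.modify dp (i + PySem.Str.len t) 0 (fun v => v + dp.getD i 0)).getD j 0
                  = dp.getD j 0 + dp.getD i 0 := by
                rw [hjp]
                exact PySem.Dict.getD_modify_self dp _ 0 _
              rw [hv]
              have hb : (!(decide (i + PySem.Str.len t > PySem.Str.len design))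
                  && decide (PySem.Str.slice design (some i) (some (i + PySem.Str.len t)) = t)
                  && decide (i + PySem.Str.len t = j)) = true := by
                rw [decide_eq_false h1, decide_eq_true h2, decide_eq_true hjp.symm]
                simp
              rw [hb]
              simp only [if_true]
              ring
            · have hv : (PySem.Dict.modify dp (i + PySem.Str.len t) 0 (fun v => v + dp.getD i 0)).getD j 0
                  = dp.getD j 0 := PySem.Dict.getD_modify_of_ne dp 0 _ hjp
              rw [hv]
              have hb : (!(decide (i + PySem.Str.len t > PySem.Str.len design))
                  && decide (PySem.Str.slice design (some i) (some (i + PySem.Str.len t)) = t)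
                  && decide (i + PySem.Str.len t = j)) = false := by
                rw [decide_eq_false (fun h => hjp h.symm : ¬ (i + PySem.Str.len t = j))]
                simp
              rw [hb]
              simp only [if_neg Bool.false_ne_true]
              ring
        · rw [if_neg h2, ih hp' dp j hji, hsplit]
          have hb : (!(decide (i + PySem.Str.len t > PySem.Str.len design))
              && decide (PySem.Str.slice design (some i) (some (i + PySem.Str.len t)) = t)
              && decide (i + PySem.Str.len t = j)) = false := by
            rw [decide_eq_false h2]
            simp
          rw [hb]
          simp only [if_neg Bool.false_ne_true]
          ring

theorem pv_match_eq (ts : List String) (design : String) (i j : Nat)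
    (hij : i < j) (hj : j ≤ design.toList.length) :
    pvMatch ts design (i : Int) (j : Int) = pvCnt ts design i j := by
  set slc := PySem.Str.slice design (some (i : Int)) (some (j : Int)) with hslc
  have hslen : slc.toList.length = j - i := pv_slice_len design i j hij hj
  have hlen : PySem.Str.len slc = (j : Int) - (i : Int) := by
    rw [PySem.Str.len_eq, hslen, Nat.cast_sub (le_of_lt hij)]
  have hcongr : ∀ t ∈ ts,
      ((!(decide ((i : Int) + PySem.Str.len t > PySem.Str.len design))
        && decide (PySem.Str.slice design (some (i : Int)) (some ((i : Int) + PySem.Str.len t)) = t)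
        && decide ((i : Int) + PySem.Str.len t = (j : Int))) = true)
      ↔ ((t == slc) = true) := by
    intro t _
    constructor
    · intro hpt
      simp only [Bool.and_eq_true, Bool.not_eq_true', decide_eq_true_eq, decide_eq_false_iff_not] at hpt
      obtain ⟨⟨hle, heq⟩, hjj⟩ := hpt
      rw [hjj] at heq
      rw [beq_iff_eq, ← heq, hslc]
    · intro ht
      rw [beq_iff_eq] at ht
      subst ht
      have harith : (i : Int) + PySem.Str.len slc = (j : Int) := by rw [hlen]; ring
      simp only [Bool.and_eq_true, Bool.not_eq_true', decide_eq_true_eq, decide_eq_false_iff_not]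
      refine ⟨⟨?_, ?_⟩, harith⟩
      · rw [harith, PySem.Str.len_eq]
        simp only [not_lt]
        exact_mod_cast hj
      · rw [harith]
  unfold pvMatch pvCnt
  rw [List.count_eq_countP, List.countP_congr hcongr]

theorem pv_a_outer (towels : List String) (design : String) :
    ∀ k, k ≤ design.toList.length →
    ∀ j : Nat, k ≤ j → j ≤ design.toList.length →
    ((PySem.List.pyRange 0 (k : Int) 1).foldl (fun dp i =>
      if dp.contains i = false then dp
      else (PySem.List.sorted towels (fun t => PySem.Str.len t) true).foldl (fun dp towel =>
        if i + PySem.Str.len towel > PySem.Str.len design then dp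
        else if PySem.Str.slice design (some i) (some (i + PySem.Str.len towel)) = towel then
          PySem.Dict.modify dp (i + PySem.Str.len towel) 0 (fun v => v + dp.getD i 0)
        else dp) dp)
      (PySem.Dict.insert PySem.Dict.empty 0 1)).getD (j : Int) 0
    = pvV towels design k j := by
  intro k
  induction k with
  | zero =>
      intro _ j _ hj
      rw [show ((0:Nat) : Int) = 0 by norm_num, PySem.List.pyRange_one_eq_nil le_rfl]
      simp only [List.foldl_nil]
      rw [PySem.Dict.getD_insert]
      rw [show pvV towels design 0 j = if j = 0 then 1 else 0 from rfl]
      by_cases hj0 : j = 0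
      · subst hj0; norm_num
      · rw [if_neg (by exact_mod_cast hj0), if_neg hj0, PySem.Dict.getD_empty]
  | succ k ih =>
      intro hk1 j hkj hj
      have hk : k ≤ design.toList.length := by omega
      have hcast : ((k+1 : Nat) : Int) = (k : Int) + 1 := by push_cast; ring
      rw [hcast, PySem.List.pyRange_one_succ_right (by positivity), List.foldl_append,
        List.foldl_cons, List.foldl_nil]
      set dpk : PySem.Dict Int Int := ((PySem.List.pyRange 0 (k : Int) 1).foldl (fun dp i =>
        if dp.contains i = false then dp
        else (PySem.List.sorted towels (fun t => PySem.Str.len t) true).foldl (fun dp towel =>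
          if i + PySem.Str.len towel > PySem.Str.len design then dp
          else if PySem.Str.slice design (some i) (some (i + PySem.Str.len towel)) = towel then
            PySem.Dict.modify dp (i + PySem.Str.len towel) 0 (fun v => v + dp.getD i 0)
          else dp) dp)
        (PySem.Dict.insert PySem.Dict.empty 0 1)) with hdpk
      have hVk : ∀ j' : Nat, k ≤ j' → j' ≤ design.toList.length →
          dpk.getD (j' : Int) 0 = pvV towels design k j' := fun j' h1 h2 => ih hk j' h1 h2
      have hpw : (PySem.List.sorted towels (fun t => PySem.Str.len t) true).Pairwise
          (fun a b => PySem.Str.len b ≤ PySem.Str.len a) :=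
        PySem.List.sorted_pairwise_rev towels (fun t => PySem.Str.len t)
      have hVsucc : pvV towels design (k+1) j = pvV towels design k j +
          (if k < j ∧ j ≤ design.toList.length then pvCnt towels design k j * pvV towels design k k else 0) := rfl
      by_cases hcont : dpk.contains (k : Int) = false
      · rw [if_pos hcont]
        have h0 : pvV towels design k k = 0 := by
          rw [← hVk k le_rfl hk]
          exact PySem.Dict.getD_of_not_contains dpk 0 hcont
        rw [hVsucc, h0, hVk j (by omega) hj]
        split_ifs <;> ring
      · rw [if_neg hcont]
        have hne : (j : Int) ≠ (k : Int) := by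
          intro h
          have : j = k := by exact_mod_cast h
          omega
        rw [pv_a_inner design (k : Int) _ hpw dpk (j : Int) hne]
        rw [pv_match_eq _ design k j (by omega) hj]
        have hperm : (PySem.List.sorted towels (fun t => PySem.Str.len t) true).Perm towels :=
          PySem.List.sorted_perm towels (fun t => PySem.Str.len t) true
        have hcnt : pvCnt (PySem.List.sorted towels (fun t => PySem.Str.len t) true) design k j
            = pvCnt towels design k j := by
          unfold pvCnt
          rw [hperm.count_eq]
        rw [hcnt, hVk j (by omega) hj, hVk k le_rfl hk, hVsucc,
          if_pos ⟨by omega, hj⟩]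

theorem pv_a_eval (towels : List String) (design : String) :
    findCombinations design (PySem.List.sorted towels (fun t => PySem.Str.len t) true)
      = pvV towels design design.toList.length design.toList.length := by
  unfold findCombinations
  have hn : PySem.Str.len design = ((design.toList.length : Nat) : Int) := by
    rw [PySem.Str.len_eq]
  simp only [hn]
  exact pv_a_outer towels design design.toList.length le_rfl design.toList.length le_rfl le_rfl

theorem pv_b_eval (towels : List String) (design : String) :
    countWays (PySem.Dict.counter (towels.filter (fun t => t.toList.length != 0)))
      (PySem.List.sorted (PySem.Set.ofList
        ((PySem.Dict.counter (towels.filter (fun t => t.toList.length != 0))).keys.map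
          (fun t => t.toList.length))) (fun x => x) false)
      design
      = pvV towels design design.toList.length design.toList.length := by
  unfold countWays
  exact (pv_b_outer towels design _ le_rfl).2 _ le_rfl

-- ===== VERDICT (by name: the statement is the Claim_ definition above) =====
theorem part2_spec : Claim_equal_part2 := by
  intro towels designs _
  show part2 towels designs = part2_alt towels designs
  unfold part2 part2_alt
  have key : ∀ (ds : List String) (c : Int),
      ds.foldl (fun count design =>
        let result := findCombinations design (PySem.List.sorted towels (fun t => PySem.Str.len t) true)
        if result ≠ 0 then count + result else count) c
      = ds.foldl (fun total design =>
          total + countWays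
            (PySem.Dict.counter (towels.filter (fun t => t.toList.length != 0)))
            (PySem.List.sorted (PySem.Set.ofList
              ((PySem.Dict.counter (towels.filter (fun t => t.toList.length != 0))).keys.map
                (fun t => t.toList.length))) (fun x => x) false)
            design) c := by
    intro ds
    induction ds with
    | nil => intro c; rfl
    | cons d ds ih =>
        intro c
        simp only [List.foldl_cons]
        rw [show (let result := findCombinations d (PySem.List.sorted towels (fun t => PySem.Str.len t) true)
              if result ≠ 0 then c + result else c)
            = c + findCombinations d (PySem.List.sorted towels (fun t => PySem.Str.len t) true) by
          by_cases h : findCombinations d (PySem.List.sorted towels (fun t => PySem.Str.len t) true) = 0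
          · simp [h]
          · simp [h]]
        rw [pv_a_eval towels d, pv_b_eval towels d]
        exact ih _
  exact key designs 0
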